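-- pv_equiv track=rewrite | github.com/yuanchenyang/incremenal-changes-study | states.py | states
-- ===== SOURCE A (Python) =====
-- def states(summary):
--     #conf = function to call in case of conflicts
--     def merge_dict(conf, d1, d2):
--         ret = {x:y for x,y in d1.items()}
--         for x in d2:
--             if x in d1:
--                 ret[x] = conf(d1[x],d2[x])
--             else:
--                 ret[x] = d2[x]
--         return ret
--
--     states = []
--     for x in summary:
--         done = False
--         for y in range(len(states)):
--             # If this node intersects with any previously known states
--             # we need to update the old state
--             if len(set(x.keys()).intersection(set(states[y].keys()))) > 0:
--                 states[y] = merge_dict(\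
--                         lambda x,y: merge_dict(\
--                             lambda a,b: a+b, x, y), \
--                         x, states[y])
--                 done = True
--                 break
--         if not done:
--             states.append(x)
--
--     return states
-- ===== SOURCE B (Python) =====
-- def states(summary):
--     # Alternative implementation: a key -> set-of-state-indices index replaces
--     # the rescan of all accumulated states; the first intersecting state is the
--     # minimum index found through the map.
--     result = []
--     keyidx = {}  # key -> set of indices of states in `result` containing that key
--     for x in summary:
--         hits = set()
--         for k in x:
--             hits |= keyidx.get(k, set())
--         if hits:
--             y = min(hits)
--             old = result[y]
--             merged = {}
--             for k, v in x.items():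
--                 if k in old:
--                     w = old[k]
--                     inner = {a: (b + w[a] if a in w else b) for a, b in v.items()}
--                     for a, c in w.items():
--                         if a not in v:
--                             inner[a] = c
--                     merged[k] = inner
--                 else:
--                     merged[k] = v
--             for k, v in old.items():
--                 if k not in x:
--                     merged[k] = v
--             result[y] = merged
--         else:
--             y = len(result)
--             result.append(x)
--         for k in x:
--             keyidx.setdefault(k, set()).add(y)
--     return result
-- ===== Notes on version B (the rewrite author's own statement) =====
-- stated objective: alternative
-- what changed: B maintains a key->set-of-state-indices map and merges into the minimum index found through it, instead of A's rescan of all accumulated states with a set-intersection test for every input dict; the per-merge dict rebuilding (which dominates on dense inputs) is unchanged, so the claim is a different algorithm, not measured speed.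
import Mathlib
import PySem

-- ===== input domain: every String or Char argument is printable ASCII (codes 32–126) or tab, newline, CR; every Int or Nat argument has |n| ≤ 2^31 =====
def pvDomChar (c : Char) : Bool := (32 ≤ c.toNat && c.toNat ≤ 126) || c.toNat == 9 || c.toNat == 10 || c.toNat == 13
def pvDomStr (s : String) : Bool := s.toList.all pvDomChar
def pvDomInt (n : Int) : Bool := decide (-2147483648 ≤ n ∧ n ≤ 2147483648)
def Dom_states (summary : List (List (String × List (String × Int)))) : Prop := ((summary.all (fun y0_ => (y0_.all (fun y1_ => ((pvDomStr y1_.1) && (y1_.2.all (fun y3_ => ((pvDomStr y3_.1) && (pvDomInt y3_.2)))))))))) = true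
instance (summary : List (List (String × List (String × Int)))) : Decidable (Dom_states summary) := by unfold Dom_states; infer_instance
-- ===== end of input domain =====

-- ===== PORT A =====
-- B replaces A's rescan of all accumulated states by a key -> state-index map (a different algorithm, not a measured speed-up); return-value equivalence only (neither function mutates its argument).

-- merge_dict(conf, d1, d2): dict comprehension copy of d1, then overwrite/append from d2
def pyMergeDict {v : Type} (conf : v -> v -> v) (d1 d2 : PySem.Dict String v) : PySem.Dict String v :=
  let ret := d1.items.foldl (fun d p => d.insert p.1 p.2) PySem.Dict.empty
  d2.keys.foldl (fun ret k =>
    match d2.get? k with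
    | none => ret            -- unreachable: k is one of d2's keys
    | some b =>
      match d1.get? k with
      | some a => ret.insert k (conf a b)
      | none => ret.insert k b) ret

-- merge_dict(lambda x,y: merge_dict(lambda a,b: a+b, x, y), x, states[y])
def mergeStateA (x s : PySem.Dict String (List (String × Int))) : PySem.Dict String (List (String × Int)) :=
  pyMergeDict (fun a b => (pyMergeDict (fun p q => p + q) (PySem.Dict.mk a) (PySem.Dict.mk b)).items) x s

-- the 'for y in range(len(states)) ... break' scan: some = merged (done), none = no intersection
def statesLoopA (x : PySem.Dict String (List (String × Int))) :
    List (PySem.Dict String (List (String × Int))) -> Option (List (PySem.Dict String (List (String × Int))))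
  | [] => none
  | s :: rest =>
    if 0 < PySem.Set.len (PySem.Set.inter (PySem.Set.ofList x.keys) (PySem.Set.ofList s.keys)) then
      some (mergeStateA x s :: rest)
    else (statesLoopA x rest).map (s :: ·)

def states (summary : List (List (String × List (String × Int)))) : List (List (String × List (String × Int))) :=
  (summary.foldl (fun sts xl =>
    match statesLoopA (PySem.Dict.mk xl) sts with
    | some sts' => sts'
    | none => sts ++ [PySem.Dict.mk xl]) []).map PySem.Dict.items

-- ===== PORT B =====

-- inner = {a: (b + w[a] if a in w else b) for a, b in v.items()}; then the w-only keys
def innerMergeB (vr wr : List (String × Int)) : List (String × Int) :=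
  let w := PySem.Dict.mk wr
  let inner := vr.foldl (fun d p =>
    d.insert p.1 (match w.get? p.1 with | some c => p.2 + c | none => p.2)) PySem.Dict.empty
  (wr.foldl (fun d p => if (PySem.Dict.mk vr).contains p.1 then d else d.insert p.1 p.2) inner).items

-- merged = x's keys (inner-merged where shared), then old's remaining keys
def mergeStateB (x old : PySem.Dict String (List (String × Int))) : PySem.Dict String (List (String × Int)) :=
  let m := x.items.foldl (fun d p =>
    d.insert p.1 (match old.get? p.1 with | some w => innerMergeB p.2 w | none => p.2)) PySem.Dict.empty
  old.items.foldl (fun d p => if x.contains p.1 then d else d.insert p.1 p.2) m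

-- for k in x: keyidx.setdefault(k, set()).add(y)
def registerB (ki : PySem.Dict String (PySem.Set Nat)) (ks : List String) (y : Nat) :
    PySem.Dict String (PySem.Set Nat) :=
  ks.foldl (fun d k => d.modify k [] (fun s => PySem.Set.add s y)) ki

def stepB (acc : List (PySem.Dict String (List (String × Int))) × PySem.Dict String (PySem.Set Nat))
    (xl : List (String × List (String × Int))) :
    List (PySem.Dict String (List (String × Int))) × PySem.Dict String (PySem.Set Nat) :=
  let x := PySem.Dict.mk xl
  let hits : PySem.Set Nat := x.keys.foldl (fun s k => PySem.Set.union s (acc.2.getD k [])) PySem.Set.empty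
  match PySem.List.min? hits (fun i => i) with
  | some y => (acc.1.set y (mergeStateB x (acc.1.getD y PySem.Dict.empty)), registerB acc.2 x.keys y)
  | none => (acc.1 ++ [x], registerB acc.2 x.keys acc.1.length)

def states_alt (summary : List (List (String × List (String × Int)))) : List (List (String × List (String × Int))) :=
  (summary.foldl stepB ([], PySem.Dict.empty)).1.map PySem.Dict.items

-- ===== PRECONDITION & SPEC =====
-- Pre_ excludes association lists that repeat a key inside one (outer or inner) dict: those do not
-- represent Python dicts, and which of the duplicate bindings survives is accidental.
def Pre_states (summary : List (List (String × List (String × Int)))) : Prop :=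
  ∀ x ∈ summary, (x.map Prod.fst).Nodup ∧ ∀ p ∈ x, (p.2.map Prod.fst).Nodup
instance (summary : List (List (String × List (String × Int)))) : Decidable (Pre_states summary) := by
  unfold Pre_states; infer_instance
def pvWitness_states : (List (List (String × List (String × Int)))) :=
  [[("a", [("u", 1)]), ("b", [])], [("b", [("u", 2), ("v", 3)])], [("c", [])]]
def Spec_states (summary : List (List (String × List (String × Int)))) (out : List (List (String × List (String × Int)))) : Prop := out = states_alt summary
instance (summary : List (List (String × List (String × Int)))) (out : List (List (String × List (String × Int)))) : Decidable (Spec_states summary out) := by unfold Spec_states; infer_instance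

-- ===== CLAIM (what is proved, stated in full; the proofs are below) =====
def Claim_equal_states : Prop := ∀ (summary : List (List (String × List (String × Int)))), Dom_states summary → Pre_states summary → Spec_states summary (states summary)

-- ===== LEMMAS AND PROOFS =====

-- Common normal form of the two merge procedures (given duplicate-free keys):
-- d1's keys with merged values, then d2's remaining items.
def nfMerge {v : Type} (conf : v -> v -> v) (d1 d2 : PySem.Dict String v) : List (String × v) :=
  d1.items.map (fun p => (p.1, match d2.get? p.1 with | some b => conf p.2 b | none => p.2))
  ++ d2.items.filter (fun q => !d1.contains q.1)

def GoodD (d : PySem.Dict String (List (String × Int))) : Prop :=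
  d.keys.Nodup ∧ ∀ p ∈ d.items, (p.2.map Prod.fst).Nodup

def GoodS (sts : List (PySem.Dict String (List (String × Int)))) : Prop := ∀ s ∈ sts, GoodD s

def InvKI (ki : PySem.Dict String (PySem.Set Nat)) (sts : List (PySem.Dict String (List (String × Int)))) : Prop :=
  ∀ k y, y ∈ ki.getD k [] ↔ ∃ s, sts[y]? = some s ∧ k ∈ s.keys

def predA (x s : PySem.Dict String (List (String × Int))) : Bool :=
  decide (0 < PySem.Set.len (PySem.Set.inter (PySem.Set.ofList x.keys) (PySem.Set.ofList s.keys)))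

-- rebuilding a duplicate-free dict from its items gives the dict back
lemma fold_insert_items {v : Type} (l : List (String × v)) (h : (l.map Prod.fst).Nodup) :
    l.foldl (fun d p => d.insert p.1 p.2) PySem.Dict.empty = PySem.Dict.mk l := by
  apply PySem.Dict.ext
  have := PySem.Dict.items_foldl_insert_fresh l (fun p => p.1) (fun p => p.2) PySem.Dict.empty
    (by intro a _; simp [PySem.Dict.contains_empty]) h
  simpa using this

-- an insert loop over fresh distinct keys writing f p builds the map
lemma fold_insert_map {v w : Type} (l : List (String × w)) (f : String × w -> v)
    (h : (l.map Prod.fst).Nodup) :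
    (l.foldl (fun d p => d.insert p.1 (f p)) PySem.Dict.empty).items = l.map (fun p => (p.1, f p)) := by
  have := PySem.Dict.items_foldl_insert_fresh l (fun p => p.1) f PySem.Dict.empty
    (by intro a _; simp [PySem.Dict.contains_empty]) h
  simpa using this

-- a guarded insert loop appends exactly the items whose key passes the guard
lemma fold_skip_insert_items {v : Type} (l : List (String × v)) (c : String -> Bool)
    (d : PySem.Dict String v) (hk : (l.map Prod.fst).Nodup)
    (hfresh : ∀ p ∈ l, c p.1 = false -> d.contains p.1 = false) :
    (l.foldl (fun d p => if c p.1 then d else d.insert p.1 p.2) d).items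
      = d.items ++ l.filter (fun p => !c p.1) := by
  have hfun : (fun (d : PySem.Dict String v) (p : String × v) => if c p.1 then d else d.insert p.1 p.2)
      = (fun d p => if (!c p.1) = true then d.insert p.1 p.2 else d) := by
    funext d p; cases hc : c p.1 <;> simp [hc]
  rw [hfun, PySem.List.foldl_if_eq_foldl_filter]
  have hnd : ((l.filter (fun p => !c p.1)).map Prod.fst).Nodup :=
    hk.sublist (List.Sublist.map Prod.fst List.filter_sublist)
  have := PySem.Dict.items_foldl_insert_fresh (l.filter (fun p => !c p.1)) (fun p => p.1)
    (fun p => p.2) d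
    (by intro p hp
        have := List.mem_filter.mp hp
        exact hfresh p this.1 (by simpa using this.2)) hnd
  simpa using this

lemma filterMap_keys_filter {v : Type} (d : PySem.Dict String v) (h : d.keys.Nodup) (c : String -> Bool) :
    d.keys.filterMap (fun k => match d.get? k with
      | some b => if c k then none else some (k, b)
      | none => none)
    = d.items.filter (fun q => !c q.1) := by
  obtain ⟨l⟩ := d
  simp only [PySem.Dict.keys] at h ⊢
  induction l with
  | nil => simp
  | cons p t ih =>
    obtain ⟨k, v⟩ := p
    simp only [List.map_cons, List.nodup_cons] at h
    simp only [List.map_cons, List.filterMap_cons, List.filter_cons]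
    have hk : (PySem.Dict.mk ((k, v) :: t)).get? k = some v := by
      simp [PySem.Dict.get?_mk_cons]
    have htail : List.filterMap (fun k' => match (PySem.Dict.mk ((k, v) :: t)).get? k' with
        | some b => if c k' then none else some (k', b)
        | none => none) (t.map Prod.fst)
        = List.filterMap (fun k' => match (PySem.Dict.mk t).get? k' with
        | some b => if c k' then none else some (k', b)
        | none => none) (t.map Prod.fst) := by
      apply List.filterMap_congr
      intro a ha
      have hne : (k == a) = false := by
        have : k ≠ a := by
          intro he; subst he; exact h.1 (by simpa using ha)
        simpa using this
      rw [PySem.Dict.get?_mk_cons]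
      simp [hne]
    rw [hk, htail, ih h.2]
    cases hc : c k <;> simp [hc]


lemma mergeLoopA_aux {v : Type} (conf : v -> v -> v) (d1 d2 : PySem.Dict String v)
    (h1 : d1.keys.Nodup) (ks : List String) (hnd : ks.Nodup) (hsub : ∀ k ∈ ks, k ∈ d2.keys) :
    (ks.foldl (fun ret k =>
        match d2.get? k with
        | none => ret
        | some b => match d1.get? k with
          | some a => ret.insert k (conf a b)
          | none => ret.insert k b) d1).items
    = d1.items.map (fun p => if p.1 ∈ ks then (match d2.get? p.1 with
          | some b => (p.1, match d1.get? p.1 with | some a => conf a b | none => b)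
          | none => p) else p)
      ++ ks.filterMap (fun k => match d2.get? k with
          | some b => if d1.contains k then none else some (k, b)
          | none => none) := by
  induction ks using List.reverseRecOn with
  | nil => simp
  | append_singleton ys k ih =>
    have hys : ys.Nodup := hnd.sublist (List.sublist_append_left ys [k])
    have hknotys : k ∉ ys := by
      have hdisj := List.disjoint_of_nodup_append hnd
      intro hk
      exact hdisj hk (List.mem_singleton.mpr rfl)
    have hsubys : ∀ k' ∈ ys, k' ∈ d2.keys := fun k' hk' => hsub k' (List.mem_append_left _ hk')
    have hitems := ih hys hsubys
    obtain ⟨b, hb⟩ : ∃ b, d2.get? k = some b := by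
      cases hq : d2.get? k with
      | none =>
        exact absurd (hsub k (List.mem_append_right _ (List.mem_singleton.mpr rfl)))
          ((PySem.Dict.get?_eq_none_iff_not_mem_keys d2 k).mp hq)
      | some b => exact ⟨b, rfl⟩
    rw [List.foldl_append, List.foldl_cons, List.foldl_nil]
    -- key-preservation of the overwrite map
    have hfst : ∀ p : String × v, (if p.1 ∈ ys then (match d2.get? p.1 with
          | some b => (p.1, match d1.get? p.1 with | some a => conf a b | none => b)
          | none => p) else p).1 = p.1 := by
      intro p
      split
      · cases d2.get? p.1 with
        | none => rfl
        | some b => cases d1.get? p.1 <;> rfl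
      · rfl
    have hfmkeys : ∀ q ∈ ys.filterMap (fun k => match d2.get? k with
          | some b => if d1.contains k then none else some (k, b)
          | none => none), q.1 ∈ ys := by
      intro q hq
      obtain ⟨k', hk', hfk'⟩ := List.mem_filterMap.mp hq
      cases hq2 : d2.get? k' with
      | none => rw [hq2] at hfk'; simp at hfk'
      | some b' =>
        rw [hq2] at hfk'
        by_cases hc : d1.contains k' = true
        · simp [hc] at hfk'
        · simp [Bool.of_not_eq_true hc] at hfk'
          obtain rfl := hfk'
          exact hk'
    rw [hb]
    cases hd1 : d1.get? k with
    | some a =>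
      have hmem1 : k ∈ d1.keys := by
        by_contra hmem
        rw [← PySem.Dict.get?_eq_none_iff_not_mem_keys] at hmem
        rw [hd1] at hmem; simp at hmem
      have hcont1 : d1.contains k = true := (PySem.Dict.contains_iff_mem_keys d1 k).mpr hmem1
      have hcontr : (ys.foldl (fun ret k =>
          match d2.get? k with
          | none => ret
          | some b => match d1.get? k with
            | some a => ret.insert k (conf a b)
            | none => ret.insert k b) d1).contains k = true := by
        rw [PySem.Dict.contains_iff_mem_keys, PySem.Dict.keys, hitems]
        obtain ⟨p, hp, hpk⟩ := List.mem_map.mp hmem1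
        refine List.mem_map.mpr ⟨_, List.mem_append_left _ (List.mem_map.mpr ⟨p, hp, rfl⟩), ?_⟩
        rw [hfst p]; exact hpk
      rw [PySem.Dict.items_insert_of_contains _ (conf a b) hcontr, hitems, List.map_append]
      have hright : List.map (fun p => if (p.1 == k) = true then (k, conf a b) else p)
            (ys.filterMap (fun k => match d2.get? k with
              | some b => if d1.contains k then none else some (k, b)
              | none => none))
          = ys.filterMap (fun k => match d2.get? k with
              | some b => if d1.contains k then none else some (k, b)
              | none => none) := by
        rw [List.map_congr_left (g := id) (fun q hq => by
          have : q.1 ≠ k := fun he => hknotys (he ▸ hfmkeys q hq)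
          simp [this]), List.map_id]
      have hleft : List.map (fun p => if (p.1 == k) = true then (k, conf a b) else p)
            (d1.items.map (fun p => if p.1 ∈ ys then (match d2.get? p.1 with
              | some b => (p.1, match d1.get? p.1 with | some a => conf a b | none => b)
              | none => p) else p))
          = d1.items.map (fun p => if p.1 ∈ ys ++ [k] then (match d2.get? p.1 with
              | some b => (p.1, match d1.get? p.1 with | some a => conf a b | none => b)
              | none => p) else p) := by
        rw [List.map_map]
        apply List.map_congr_left
        intro p hp
        have hMfst : (match d2.get? p.1 with
            | some b => (p.1, match d1.get? p.1 with | some a => conf a b | none => b)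
            | none => p).1 = p.1 := by
          cases d2.get? p.1 with
          | none => rfl
          | some b => cases d1.get? p.1 <;> rfl
        by_cases hpk : p.1 = k
        · have hpys : p.1 ∉ ys := hpk ▸ hknotys
          have hmem : p.1 ∈ ys ++ [k] := List.mem_append_right _ (List.mem_singleton.mpr hpk)
          simp only [Function.comp_apply]
          rw [if_neg hpys, if_pos hmem, hpk, hb, hd1]
          simp
        · by_cases hys2 : p.1 ∈ ys
          · have hmem2 : p.1 ∈ ys ++ [k] := List.mem_append_left _ hys2
            have hcond : ¬((match d2.get? p.1 with
                | some b => (p.1, match d1.get? p.1 with | some a => conf a b | none => b)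
                | none => p).1 == k) = true := by
              rw [hMfst]; simpa using hpk
            simp only [Function.comp_apply]
            rw [if_pos hys2, if_pos hmem2, if_neg hcond]
          · have hmem2 : p.1 ∉ ys ++ [k] := by
              simp [List.mem_append, hys2, hpk]
            have hcond : ¬(p.1 == k) = true := by simpa using hpk
            simp only [Function.comp_apply]
            rw [if_neg hys2, if_neg hmem2, if_neg hcond]
      rw [hright, hleft, List.filterMap_append]
      simp [hb, hcont1]
    | none =>
      have hmem1 : k ∉ d1.keys := (PySem.Dict.get?_eq_none_iff_not_mem_keys d1 k).mp hd1
      have hcont1 : d1.contains k = false := by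
        cases hc : d1.contains k
        · rfl
        · exact absurd ((PySem.Dict.contains_iff_mem_keys d1 k).mp hc) hmem1
      have hcontr : (ys.foldl (fun ret k =>
          match d2.get? k with
          | none => ret
          | some b => match d1.get? k with
            | some a => ret.insert k (conf a b)
            | none => ret.insert k b) d1).contains k = false := by
        cases hc : (ys.foldl _ d1).contains k
        · rfl
        · exfalso
          have := (PySem.Dict.contains_iff_mem_keys _ k).mp hc
          rw [PySem.Dict.keys, hitems, List.map_append] at this
          rcases List.mem_append.mp this with hl | hr
          · obtain ⟨p', hp', hpk⟩ := List.mem_map.mp hl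
            obtain ⟨p, hp, rfl⟩ := List.mem_map.mp hp'
            rw [hfst p] at hpk
            exact hmem1 (hpk ▸ List.mem_map.mpr ⟨p, hp, rfl⟩)
          · obtain ⟨q, hq, hqk⟩ := List.mem_map.mp hr
            exact hknotys (hqk ▸ hfmkeys q hq)
      rw [PySem.Dict.items_insert_of_not_contains _ b hcontr, hitems, List.filterMap_append]
      have hleft : d1.items.map (fun p => if p.1 ∈ ys then (match d2.get? p.1 with
            | some b => (p.1, match d1.get? p.1 with | some a => conf a b | none => b)
            | none => p) else p)
          = d1.items.map (fun p => if p.1 ∈ ys ++ [k] then (match d2.get? p.1 with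
            | some b => (p.1, match d1.get? p.1 with | some a => conf a b | none => b)
            | none => p) else p) := by
        apply List.map_congr_left
        intro p hp
        have hpk : p.1 ≠ k := by
          intro he
          exact hmem1 (he ▸ List.mem_map.mpr ⟨p, hp, rfl⟩)
        have hmem : (p.1 ∈ ys ++ [k]) ↔ (p.1 ∈ ys) := by
          simp [List.mem_append, hpk]
        simp only [hmem]
      rw [hleft]
      simp [hb, hcont1, List.append_assoc]

lemma pyMergeDict_items {v : Type} (conf : v -> v -> v) (d1 d2 : PySem.Dict String v)
    (h1 : d1.keys.Nodup) (h2 : d2.keys.Nodup) :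
    (pyMergeDict conf d1 d2).items = nfMerge conf d1 d2 := by
  unfold pyMergeDict
  rw [fold_insert_items d1.items h1]
  have hmk2 : PySem.Dict.mk d1.items = d1 := rfl
  rw [hmk2]
  rw [mergeLoopA_aux conf d1 d2 h1 d2.keys h2 (fun k hk => hk)]
  unfold nfMerge
  congr 1
  · apply List.map_congr_left
    intro p hp
    have hget1 : d1.get? p.1 = some p.2 :=
      (PySem.Dict.get?_eq_some_iff_mem_items d1 p.1 p.2 h1).mpr hp
    cases hq : d2.get? p.1 with
    | some b =>
      have hmem : p.1 ∈ d2.keys := by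
        by_contra hmem
        rw [← PySem.Dict.get?_eq_none_iff_not_mem_keys] at hmem
        rw [hq] at hmem; simp at hmem
      simp [hmem, hq, hget1]
    | none =>
      have hmem : p.1 ∉ d2.keys := (PySem.Dict.get?_eq_none_iff_not_mem_keys d2 p.1).mp hq
      simp [hmem, hq]
  · exact filterMap_keys_filter d2 h2 (fun k => d1.contains k)

lemma innerMergeB_eq (vr wr : List (String × Int))
    (hv : (vr.map Prod.fst).Nodup) (hw : (wr.map Prod.fst).Nodup) :
    innerMergeB vr wr = nfMerge (fun p q => p + q) (PySem.Dict.mk vr) (PySem.Dict.mk wr) := by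
  show (wr.foldl (fun d p => if (PySem.Dict.mk vr).contains p.1 then d else d.insert p.1 p.2)
      (vr.foldl (fun d p => d.insert p.1 (match (PySem.Dict.mk wr).get? p.1 with
        | some c => p.2 + c
        | none => p.2)) PySem.Dict.empty)).items = _
  have hinner := fold_insert_map vr (fun p => match (PySem.Dict.mk wr).get? p.1 with
    | some c => p.2 + c
    | none => p.2) hv
  have hcont : ∀ s, (vr.foldl (fun d p => d.insert p.1 (match (PySem.Dict.mk wr).get? p.1 with
      | some c => p.2 + c
      | none => p.2)) PySem.Dict.empty).contains s = (PySem.Dict.mk vr).contains s := by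
    intro s
    simp only [PySem.Dict.contains, hinner, List.any_map]
    rfl
  have hfresh : ∀ p ∈ wr, (fun s => (PySem.Dict.mk vr).contains s) p.1 = false →
      (vr.foldl (fun d p => d.insert p.1 (match (PySem.Dict.mk wr).get? p.1 with
        | some c => p.2 + c
        | none => p.2)) PySem.Dict.empty).contains p.1 = false := by
    intro p _ hc
    rw [hcont p.1]
    exact hc
  rw [fold_skip_insert_items wr (fun s => (PySem.Dict.mk vr).contains s) _ hw hfresh, hinner]
  simp only [nfMerge]
  exact congrArg₂ (· ++ ·) (List.map_congr_left fun p _ => by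
    cases hq : (PySem.Dict.mk wr).get? p.1 <;> simp [hq]) rfl

lemma mergeStateB_items (x old : PySem.Dict String (List (String × Int)))
    (hx : x.keys.Nodup) (hold : old.keys.Nodup) :
    (mergeStateB x old).items = nfMerge (fun a b => innerMergeB a b) x old := by
  show (old.items.foldl (fun d p => if x.contains p.1 then d else d.insert p.1 p.2)
      (x.items.foldl (fun d p => d.insert p.1 (match old.get? p.1 with
        | some w => innerMergeB p.2 w
        | none => p.2)) PySem.Dict.empty)).items = _
  have hx' : (x.items.map Prod.fst).Nodup := hx
  have hold' : (old.items.map Prod.fst).Nodup := hold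
  have hm := fold_insert_map x.items (fun p => match old.get? p.1 with
    | some w => innerMergeB p.2 w
    | none => p.2) hx'
  have hcont : ∀ s, (x.items.foldl (fun d p => d.insert p.1 (match old.get? p.1 with
      | some w => innerMergeB p.2 w
      | none => p.2)) PySem.Dict.empty).contains s = x.contains s := by
    intro s
    simp only [PySem.Dict.contains, hm, List.any_map]
    rfl
  have hfresh : ∀ p ∈ old.items, (fun s => x.contains s) p.1 = false →
      (x.items.foldl (fun d p => d.insert p.1 (match old.get? p.1 with
        | some w => innerMergeB p.2 w
        | none => p.2)) PySem.Dict.empty).contains p.1 = false := by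
    intro p _ hc
    rw [hcont p.1]
    exact hc
  rw [fold_skip_insert_items old.items (fun s => x.contains s) _ hold' hfresh, hm]
  simp only [nfMerge]
  exact congrArg₂ (· ++ ·) (List.map_congr_left fun p _ => by
    cases hq : old.get? p.1 <;> simp [hq]) rfl

lemma mergeState_eq (x old : PySem.Dict String (List (String × Int)))
    (hx : GoodD x) (hold : GoodD old) :
    mergeStateA x old = mergeStateB x old := by
  apply PySem.Dict.ext
  show (pyMergeDict (fun a b => (pyMergeDict (fun p q => p + q)
      (PySem.Dict.mk a) (PySem.Dict.mk b)).items) x old).items = _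
  rw [pyMergeDict_items _ x old hx.1 hold.1, mergeStateB_items x old hx.1 hold.1]
  unfold nfMerge
  congr 1
  apply List.map_congr_left
  intro p hp
  cases hw : old.get? p.1 with
  | none => rfl
  | some w =>
    have hv : (p.2.map Prod.fst).Nodup := hx.2 p hp
    have hwmem : (p.1, w) ∈ old.items :=
      (PySem.Dict.get?_eq_some_iff_mem_items old p.1 w hold.1).mp hw
    have hw' : (w.map Prod.fst).Nodup := hold.2 _ hwmem
    have hA : (pyMergeDict (fun p q => p + q) (PySem.Dict.mk p.2) (PySem.Dict.mk w)).items
        = nfMerge (fun p q => p + q) (PySem.Dict.mk p.2) (PySem.Dict.mk w) :=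
      pyMergeDict_items _ _ _ hv hw'
    simp only [hA, innerMergeB_eq p.2 w hv hw']

lemma nfMerge_fst {v : Type} (conf : v -> v -> v) (d1 d2 : PySem.Dict String v) :
    (nfMerge conf d1 d2).map Prod.fst
      = d1.keys ++ (d2.items.filter (fun q => !d1.contains q.1)).map Prod.fst := by
  simp [nfMerge, PySem.Dict.keys, List.map_map, Function.comp_def]

lemma nfMerge_fst_nodup {v : Type} (conf : v -> v -> v) (d1 d2 : PySem.Dict String v)
    (h1 : d1.keys.Nodup) (h2 : d2.keys.Nodup) :
    ((nfMerge conf d1 d2).map Prod.fst).Nodup := by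
  rw [nfMerge_fst]
  refine List.Nodup.append h1 (h2.sublist (List.Sublist.map Prod.fst List.filter_sublist)) ?_
  intro k hk1 hk2
  obtain ⟨q, hq, rfl⟩ := List.mem_map.mp hk2
  have := List.mem_filter.mp hq
  have hnc : d1.contains q.1 = false := by simpa using this.2
  rw [← PySem.Dict.contains_iff_mem_keys] at hk1
  simp [hnc] at hk1

lemma mem_nfMerge_fst {v : Type} (conf : v -> v -> v) (d1 d2 : PySem.Dict String v) (k : String) :
    k ∈ (nfMerge conf d1 d2).map Prod.fst ↔ k ∈ d1.keys ∨ k ∈ d2.keys := by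
  rw [nfMerge_fst]
  simp only [List.mem_append, List.mem_map, List.mem_filter]
  constructor
  · rintro (h | ⟨q, ⟨hq, hnc⟩, rfl⟩)
    · exact Or.inl h
    · exact Or.inr (List.mem_map.mpr ⟨q, hq, rfl⟩)
  · rintro (h | h)
    · exact Or.inl h
    · by_cases hd1 : k ∈ d1.keys
      · exact Or.inl hd1
      · obtain ⟨q, hq, rfl⟩ := List.mem_map.mp h
        refine Or.inr ⟨q, ⟨hq, ?_⟩, rfl⟩
        have : d1.contains q.1 = false := by
          cases hc : d1.contains q.1
          · rfl
          · exact absurd (PySem.Dict.contains_iff_mem_keys d1 q.1 |>.mp hc) hd1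
        simp [this]

lemma mergeStateB_good (x old : PySem.Dict String (List (String × Int)))
    (hx : GoodD x) (hold : GoodD old) : GoodD (mergeStateB x old) := by
  have hitems := mergeStateB_items x old hx.1 hold.1
  constructor
  · show ((mergeStateB x old).items.map (fun q => q.1)).Nodup
    rw [hitems]
    exact nfMerge_fst_nodup _ x old hx.1 hold.1
  · intro p hp
    rw [hitems] at hp
    rcases List.mem_append.mp hp with hl | hr
    · obtain ⟨q, hq, rfl⟩ := List.mem_map.mp hl
      cases hwq : old.get? q.1 with
      | none => simpa [hwq] using hx.2 q hq
      | some w =>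
        have hv : (q.2.map Prod.fst).Nodup := hx.2 q hq
        have hwmem : (q.1, w) ∈ old.items :=
          (PySem.Dict.get?_eq_some_iff_mem_items old q.1 w hold.1).mp hwq
        have hw' : (w.map Prod.fst).Nodup := hold.2 _ hwmem
        have := innerMergeB_eq q.2 w hv hw'
        simp only [hwq]
        rw [this]
        exact nfMerge_fst_nodup _ _ _ hv hw'
    · exact hold.2 _ (List.mem_filter.mp hr).1

lemma mem_mergeStateB_keys (x old : PySem.Dict String (List (String × Int)))
    (hx : x.keys.Nodup) (hold : old.keys.Nodup) (k : String) :
    k ∈ (mergeStateB x old).keys ↔ k ∈ x.keys ∨ k ∈ old.keys := by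
  show k ∈ (mergeStateB x old).items.map (fun q => q.1) ↔ _
  rw [mergeStateB_items x old hx hold]
  exact mem_nfMerge_fst _ x old k

lemma predA_iff (x s : PySem.Dict String (List (String × Int))) :
    predA x s = true ↔ ∃ k ∈ x.keys, k ∈ s.keys := by
  simp only [predA, decide_eq_true_eq, PySem.Set.len, Int.natCast_pos,
    List.length_pos_iff_exists_mem]
  simp [PySem.Set.mem_inter, PySem.Set.mem_ofList]

lemma statesLoopA_eq (x : PySem.Dict String (List (String × Int)))
    (sts : List (PySem.Dict String (List (String × Int)))) :
    statesLoopA x sts = (sts.findIdx? (predA x)).map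
      (fun y => sts.set y (mergeStateA x (sts.getD y PySem.Dict.empty))) := by
  induction sts with
  | nil => simp [statesLoopA]
  | cons s rest ih =>
    rw [List.findIdx?_cons]
    by_cases h : 0 < PySem.Set.len (PySem.Set.inter (PySem.Set.ofList x.keys) (PySem.Set.ofList s.keys))
    · have hp : predA x s = true := by
        simp only [predA, decide_eq_true_eq]; exact h
      rw [statesLoopA, if_pos h]
      simp [hp]
    · have hp : predA x s = false := by
        simp only [predA, decide_eq_false_iff_not]; exact h
      rw [statesLoopA, if_neg h, ih, hp]
      cases hf : rest.findIdx? (predA x) <;>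
        simp [List.getD_cons_succ, List.set_cons_succ]

lemma mem_foldl_union (g : String -> List Nat) (l : List String) (s0 : List Nat) (y : Nat) :
    y ∈ l.foldl (fun s k => PySem.Set.union s (g k)) s0 ↔ y ∈ s0 ∨ ∃ k ∈ l, y ∈ g k := by
  induction l generalizing s0 with
  | nil => simp
  | cons a t ih =>
    rw [List.foldl_cons, ih]
    simp only [PySem.Set.union, PySem.Set.mem_update, List.mem_cons]
    aesop

lemma mem_getD_registerB (ki : PySem.Dict String (PySem.Set Nat)) (ks : List String)
    (y : Nat) (k : String) (z : Nat) :
    z ∈ (registerB ki ks y).getD k [] ↔ z ∈ ki.getD k [] ∨ (k ∈ ks ∧ z = y) := by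
  induction ks generalizing ki with
  | nil => simp [registerB]
  | cons a t ih =>
    simp only [registerB, List.foldl_cons] at ih ⊢
    rw [ih]
    rw [PySem.Dict.getD_modify]
    by_cases hka : k = a
    · subst hka
      simp [PySem.Set.mem_add]
      try tauto
    · simp [hka]
      try tauto

lemma min_hits_eq_findIdx (x : PySem.Dict String (List (String × Int)))
    (sts : List (PySem.Dict String (List (String × Int)))) (ki : PySem.Dict String (PySem.Set Nat))
    (hki : InvKI ki sts) :
    PySem.List.min? (x.keys.foldl (fun s k => PySem.Set.union s (ki.getD k [])) PySem.Set.empty)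
        (fun i => i)
      = sts.findIdx? (predA x) := by
  have hmem : ∀ y, y ∈ x.keys.foldl (fun s k => PySem.Set.union s (ki.getD k [])) PySem.Set.empty
      ↔ ∃ s', sts[y]? = some s' ∧ predA x s' = true := by
    intro y
    rw [mem_foldl_union (fun k => ki.getD k []) x.keys PySem.Set.empty y]
    constructor
    · rintro (h | ⟨k, hk, hy⟩)
      · cases h
      · obtain ⟨s', hs', hks'⟩ := (hki k y).mp hy
        exact ⟨s', hs', (predA_iff x s').mpr ⟨k, hk, hks'⟩⟩
    · rintro ⟨s', hs', hp⟩
      obtain ⟨k, hk, hks'⟩ := (predA_iff x s').mp hp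
      exact Or.inr ⟨k, hk, (hki k y).mpr ⟨s', hs', hks'⟩⟩
  cases hf : sts.findIdx? (predA x) with
  | none =>
    have hnone := List.findIdx?_eq_none_iff.mp hf
    have hemp : x.keys.foldl (fun s k => PySem.Set.union s (ki.getD k [])) PySem.Set.empty = [] := by
      apply List.eq_nil_iff_forall_not_mem.mpr
      intro y hy
      obtain ⟨s', hs', hp⟩ := (hmem y).mp hy
      have : s' ∈ sts := List.mem_of_getElem? hs'
      rw [hnone s' this] at hp
      exact Bool.false_ne_true hp
    rw [hemp]
    exact (PySem.List.min?_eq_none_iff _ _).mpr rfl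
  | some y =>
    obtain ⟨hlt, hp, hmin⟩ := List.findIdx?_eq_some_iff_getElem.mp hf
    have hy : y ∈ x.keys.foldl (fun s k => PySem.Set.union s (ki.getD k [])) PySem.Set.empty :=
      (hmem y).mpr ⟨sts[y], by simp [List.getElem?_eq_getElem hlt], hp⟩
    have hlb : ∀ z ∈ x.keys.foldl (fun s k => PySem.Set.union s (ki.getD k [])) PySem.Set.empty,
        y ≤ z := by
      intro z hz
      obtain ⟨s', hs', hps⟩ := (hmem z).mp hz
      obtain ⟨hzlt, hzget⟩ := List.getElem?_eq_some_iff.mp hs'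
      by_contra hzy
      push_neg at hzy
      have := hmin z hzy
      rw [hzget] at this
      exact this hps
    cases hm : PySem.List.min? (x.keys.foldl (fun s k => PySem.Set.union s (ki.getD k []))
        PySem.Set.empty) (fun i => i) with
    | none =>
      rw [PySem.List.min?_eq_none_iff] at hm
      rw [hm] at hy
      cases hy
    | some m =>
      have h1 : m ∈ _ := PySem.List.min?_mem hm
      have h2 := PySem.List.min?_isMin hm
      have : m = y := le_antisymm (h2 y hy) (hlb m h1)
      rw [this]

lemma step_eq (xl : List (String × List (String × Int)))
    (hxl : GoodD (PySem.Dict.mk xl))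
    (sts : List (PySem.Dict String (List (String × Int)))) (ki : PySem.Dict String (PySem.Set Nat))
    (hki : InvKI ki sts) (hg : GoodS sts) :
    (match statesLoopA (PySem.Dict.mk xl) sts with
     | some sts' => sts'
     | none => sts ++ [PySem.Dict.mk xl]) = (stepB (sts, ki) xl).1
    ∧ InvKI (stepB (sts, ki) xl).2 (stepB (sts, ki) xl).1
    ∧ GoodS (stepB (sts, ki) xl).1 := by
  have hstep : stepB (sts, ki) xl = (match PySem.List.min?
      ((PySem.Dict.mk xl).keys.foldl (fun s k => PySem.Set.union s (ki.getD k []))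
        PySem.Set.empty) (fun i => i) with
    | some y => (sts.set y (mergeStateB (PySem.Dict.mk xl) (sts.getD y PySem.Dict.empty)),
        registerB ki (PySem.Dict.mk xl).keys y)
    | none => (sts ++ [PySem.Dict.mk xl], registerB ki (PySem.Dict.mk xl).keys sts.length)) := rfl
  rw [hstep, min_hits_eq_findIdx (PySem.Dict.mk xl) sts ki hki, statesLoopA_eq]
  cases hf : sts.findIdx? (predA (PySem.Dict.mk xl)) with
  | none =>
    simp only
    refine ⟨rfl, ?_, ?_⟩
    · intro k z
      rw [mem_getD_registerB, hki k z]
      have hlen : ∀ w : Nat, (sts ++ [PySem.Dict.mk xl])[w]? =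
          if w < sts.length then sts[w]?
          else if w = sts.length then some (PySem.Dict.mk xl) else none := by
        intro w
        by_cases h1 : w < sts.length
        · rw [List.getElem?_append_left h1]
          simp [h1]
        · rw [List.getElem?_append_right (le_of_not_gt h1)]
          by_cases h2 : w = sts.length
          · subst h2
            simp
          · rw [if_neg h1, if_neg h2]
            have : 1 ≤ w - sts.length := by omega
            exact List.getElem?_eq_none (by simpa using this)
      rw [hlen z]
      by_cases h1 : z < sts.length
      · simp only [if_pos h1]
        constructor
        · rintro (⟨s, hs, hks⟩ | ⟨hk, rfl⟩)
          · exact ⟨s, hs, hks⟩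
          · omega
        · rintro ⟨s, hs, hks⟩
          exact Or.inl ⟨s, hs, hks⟩
      · by_cases h2 : z = sts.length
        · simp only [if_neg h1, if_pos h2]
          constructor
          · rintro (⟨s, hs, hks⟩ | ⟨hk, rfl⟩)
            · rw [List.getElem?_eq_none (by omega)] at hs
              cases hs
            · exact ⟨PySem.Dict.mk xl, rfl, hk⟩
          · rintro ⟨s, hs, hks⟩
            obtain rfl := Option.some.inj hs
            exact Or.inr ⟨hks, h2⟩
        · simp only [if_neg h1, if_neg h2]
          constructor
          · rintro (⟨s, hs, hks⟩ | ⟨hk, rfl⟩)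
            · rw [List.getElem?_eq_none (by omega)] at hs
              cases hs
            · omega
          · rintro ⟨s, hs, hks⟩
            cases hs
    · intro s hs
      rcases List.mem_append.mp hs with h | h
      · exact hg s h
      · rw [List.mem_singleton.mp h]
        exact hxl
  | some y =>
    have hylt : y < sts.length := (List.findIdx?_eq_some_iff_getElem.mp hf).1
    have hyget : sts[y]? = some sts[y] := List.getElem?_eq_getElem hylt
    have hold : sts.getD y PySem.Dict.empty = sts[y] := by
      rw [List.getD_eq_getElem?_getD, hyget]
      rfl
    have holdG : GoodD (sts.getD y PySem.Dict.empty) := by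
      rw [hold]
      exact hg _ (List.getElem_mem hylt)
    simp only [Option.map_some]
    refine ⟨?_, ?_, ?_⟩
    · rw [mergeState_eq (PySem.Dict.mk xl) (sts.getD y PySem.Dict.empty) hxl holdG]
    · intro k z
      rw [mem_getD_registerB, hki k z]
      by_cases hzy : z = y
      · subst hzy
        have hset : (sts.set z (mergeStateB (PySem.Dict.mk xl) (sts.getD z PySem.Dict.empty)))[z]?
            = some (mergeStateB (PySem.Dict.mk xl) (sts.getD z PySem.Dict.empty)) := by
          rw [List.getElem?_set]
          simp [hylt]
        rw [hset]
        constructor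
        · rintro (⟨s, hs, hks⟩ | ⟨hk, -⟩)
          · refine ⟨_, rfl, ?_⟩
            rw [mem_mergeStateB_keys _ _ hxl.1 holdG.1]
            right
            have hseq : s = sts[z] := by
              rw [hyget] at hs
              exact (Option.some.inj hs).symm
            rw [hold, ← hseq]
            exact hks
          · refine ⟨_, rfl, ?_⟩
            rw [mem_mergeStateB_keys _ _ hxl.1 holdG.1]
            exact Or.inl hk
        · rintro ⟨s, hs, hks⟩
          obtain rfl := Option.some.inj hs
          rw [mem_mergeStateB_keys _ _ hxl.1 holdG.1] at hks
          rcases hks with hk | hk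
          · exact Or.inr ⟨hk, rfl⟩
          · rw [hold] at hk
            exact Or.inl ⟨sts[z], hyget, hk⟩
      · rw [List.getElem?_set, if_neg (fun h => hzy h.symm)]
        constructor
        · rintro (⟨s, hs, hks⟩ | ⟨-, rfl⟩)
          · exact ⟨s, hs, hks⟩
          · exact absurd rfl hzy
        · rintro ⟨s, hs, hks⟩
          exact Or.inl ⟨s, hs, hks⟩
    · intro s hs
      rcases List.mem_or_eq_of_mem_set hs with h | h
      · exact hg s h
      · rw [h]
        exact mergeStateB_good _ _ hxl holdG

lemma main_fold (rest : List (List (String × List (String × Int)))) :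
    ∀ (sts : List (PySem.Dict String (List (String × Int)))) (ki : PySem.Dict String (PySem.Set Nat)),
    (∀ x ∈ rest, GoodD (PySem.Dict.mk x)) -> InvKI ki sts -> GoodS sts ->
    rest.foldl (fun sts xl =>
      match statesLoopA (PySem.Dict.mk xl) sts with
      | some sts' => sts'
      | none => sts ++ [PySem.Dict.mk xl]) sts
      = (rest.foldl stepB (sts, ki)).1 := by
  induction rest with
  | nil => intro sts ki _ _ _; rfl
  | cons xl t ih =>
    intro sts ki hx hki hg
    obtain ⟨heq, hki2, hg2⟩ := step_eq xl (hx xl List.mem_cons_self) sts ki hki hg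
    rw [List.foldl_cons, List.foldl_cons, heq]
    exact ih ((stepB (sts, ki) xl).1) ((stepB (sts, ki) xl).2)
      (fun z hz => hx z (List.mem_cons_of_mem _ hz)) hki2 hg2

-- ===== VERDICT (by name: the statement is the Claim_ definition above) =====
theorem states_spec : Claim_equal_states := by
  intro summary _hdom hpre
  unfold Spec_states states states_alt
  have hgood : ∀ x ∈ summary, GoodD (PySem.Dict.mk x) := by
    intro x hx
    obtain ⟨h1, h2⟩ := hpre x hx
    exact ⟨by simpa [PySem.Dict.keys] using h1, by simpa using h2⟩
  have hki : InvKI PySem.Dict.empty [] := by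
    intro k y
    simp [PySem.Dict.getD_empty]
  have := main_fold summary [] PySem.Dict.empty hgood hki (by intro s hs; simp at hs)
  rw [this]
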